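-- pv_equiv track=rewrite | github.com/Mr-EZO949/CDCL-sat-solver | satsolver/preprocess.py | subsume
-- ===== SOURCE A (Python) =====
-- def _dedup(clauses: list[list[int]]) -> list[list[int]]:
--     out: list[list[int]] = []
--     for cl in clauses:
--         seen: dict[int, bool] = {}
--         tautology = False
--         for l in cl:
--             if -l in seen:
--                 tautology = True
--                 break
--             seen[l] = True
--         if tautology:
--             continue
--         out.append(list(seen.keys()))
--     return out
--
-- def _occur_index(clauses: list[list[int]]) -> dict[int, list[int]]:
--     idx: dict[int, list[int]] = {}
--     for i, cl in enumerate(clauses):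
--         for l in cl:
--             idx.setdefault(l, []).append(i)
--     return idx
--
-- def subsume(clauses: list[list[int]]) -> list[list[int]]:
--     clauses = _dedup(clauses)
--     sets = [frozenset(c) for c in clauses]
--     order = sorted(range(len(clauses)), key=lambda i: len(clauses[i]))
--     alive = [True] * len(clauses)
--     occ = _occur_index(clauses)
--
--     for i in order:
--         if not alive[i]:
--             continue
--         ci = sets[i]
--         pivot = min(ci, key=lambda l: len(occ.get(l, [])))
--         for j in occ.get(pivot, []):
--             if j == i or not alive[j]:
--                 continue
--             if len(clauses[j]) < len(clauses[i]):
--                 continue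
--             if ci <= sets[j]:
--                 alive[j] = False
--
--     return [clauses[i] for i in range(len(clauses)) if alive[i]]
-- ===== SOURCE B (Python) =====
-- def _clean(cl):
--     seen = set()
--     out = []
--     for l in cl:
--         if -l in seen:
--             return None
--         if l not in seen:
--             seen.add(l)
--             out.append(l)
--     return out
--
-- def subsume(clauses):
--     kept = []
--     for cl in clauses:
--         c = _clean(cl)
--         if c is not None:
--             kept.append(c)
--     sets = [set(c) for c in kept]
--     alive = [True] * len(kept)
--     for i in sorted(range(len(kept)), key=lambda i: len(kept[i])):
--         if not alive[i]:
--             continue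
--         for j in range(len(kept)):
--             if j != i and alive[j] and len(kept[j]) >= len(kept[i]) and sets[i] <= sets[j]:
--                 alive[j] = False
--     return [c for c, a in zip(kept, alive) if a]
-- ===== Notes on version B (the rewrite author's own statement) =====
-- stated objective: simpler
-- what changed: B deletes the occurrence index (_occur_index) and the min-over-literals pivot selection entirely: for each alive clause in the same length-sorted order it scans all clause indices directly with one combined condition, and it rewrites dedup as a per-clause early-return helper; equivalent because a subsumed clause must contain every literal of the subsuming clause, in particular the pivot.
import Mathlib
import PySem

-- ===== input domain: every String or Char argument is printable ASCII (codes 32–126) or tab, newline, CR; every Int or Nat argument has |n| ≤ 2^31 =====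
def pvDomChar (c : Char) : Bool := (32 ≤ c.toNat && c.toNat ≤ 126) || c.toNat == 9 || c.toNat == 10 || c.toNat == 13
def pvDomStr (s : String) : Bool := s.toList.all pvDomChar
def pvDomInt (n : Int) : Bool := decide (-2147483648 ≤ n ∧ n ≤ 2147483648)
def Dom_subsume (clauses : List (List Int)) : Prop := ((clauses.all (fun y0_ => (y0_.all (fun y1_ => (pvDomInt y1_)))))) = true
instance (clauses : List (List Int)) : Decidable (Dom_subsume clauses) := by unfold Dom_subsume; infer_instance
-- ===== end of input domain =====

-- B drops A's occurrence index and pivot selection: for each alive clause (in the same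
-- length-sorted order) it scans ALL clause indices directly; equal because a subsumed
-- clause necessarily contains every literal of the subsuming one, in particular the pivot.
-- Objective: simpler (no index structure, no pivot computation); not faster.

-- ===== PORT A =====
-- inner loop of _dedup over one clause ('for l in cl' with break → structural recursion)
def pvSeenLoopA : List Int → PySem.Dict Int Bool → PySem.Dict Int Bool × Bool
  | [], seen => (seen, false)
  | l :: rest, seen =>
    if seen.contains (-l) then (seen, true)
    else pvSeenLoopA rest (seen.insert l true)

def pvDedupA (clauses : List (List Int)) : List (List Int) :=
  clauses.foldl (fun out cl =>
    let r := pvSeenLoopA cl PySem.Dict.empty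
    if r.2 then out else out ++ [r.1.keys]) []

-- _occur_index: 'for i, cl in enumerate(clauses): for l in cl: idx.setdefault(l, []).append(i)'
-- (enumerate's counter is the explicit Nat argument; setdefault-then-append = insert of getD ++ [i])
def pvOccGoA : List (List Int) → Nat → PySem.Dict Int (List Nat) → PySem.Dict Int (List Nat)
  | [], _, idx => idx
  | cl :: cls, i, idx =>
      pvOccGoA cls (i + 1) (cl.foldl (fun idx l => idx.insert l (idx.getD l [] ++ [i])) idx)

def pvOccIndexA (clauses : List (List Int)) : PySem.Dict Int (List Nat) :=
  pvOccGoA clauses 0 PySem.Dict.empty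

-- body of A's 'for i in order' loop (pivot via min over ci with the occurrence-list-length key;
-- Python iterates the frozenset in hash order: under key ties the pivot choice is
-- order-dependent, but subsume's RESULT does not depend on which member is picked —
-- that is exactly what the equivalence with the pivot-free B below proves;
-- 'none' = min() on an empty clause, where Python raises ValueError: excluded by Pre_)
def pvStepA (cs : List (List Int)) (sets : List (PySem.Set Int))
    (occ : PySem.Dict Int (List Nat)) (alive : List Bool) (i : Nat) : List Bool :=
  if !(alive.getD i false) then alive
  else
    let ci : PySem.Set Int := sets.getD i []
    match PySem.List.min? ci (fun l => (occ.getD l []).length) with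
    | none => alive
    | some pivot =>
      (occ.getD pivot []).foldl (fun alive j =>
        if j == i || !(alive.getD j false) then alive
        else if (cs.getD j []).length < (cs.getD i []).length then alive
        else if PySem.Set.issubset ci (sets.getD j []) then alive.set j false
        else alive) alive

def subsume (clauses : List (List Int)) : List (List Int) :=
  let cs := pvDedupA clauses
  let sets := cs.map (fun c => PySem.Set.ofList c)
  let order := PySem.List.sorted (List.range cs.length) (fun i => (cs.getD i []).length) false
  let occ := pvOccIndexA cs
  let alive := order.foldl (pvStepA cs sets occ) (List.replicate cs.length true)
  ((List.range cs.length).filter (fun i => alive.getD i false)).map (fun i => cs.getD i [])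

-- ===== PORT B =====
-- _clean: one pass, early-return None on a tautology, set+list for order-keeping dedup
def pvCleanB : List Int → PySem.Set Int → List Int → Option (List Int)
  | [], _, out => some out
  | l :: rest, seen, out =>
    if (-l) ∈ seen then none
    else if l ∈ seen then pvCleanB rest seen out
    else pvCleanB rest (PySem.Set.add seen l) (out ++ [l])

def pvKeptB (clauses : List (List Int)) : List (List Int) :=
  clauses.foldl (fun kept cl =>
    match pvCleanB cl PySem.Set.empty [] with
    | none => kept
    | some c => kept ++ [c]) []

-- body of B's outer loop: direct scan over ALL indices j
def pvStepB (kept : List (List Int)) (sets : List (PySem.Set Int))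
    (alive : List Bool) (i : Nat) : List Bool :=
  if alive.getD i false then
    (List.range kept.length).foldl (fun alive j =>
      if (j != i) && alive.getD j false
          && decide ((kept.getD i []).length ≤ (kept.getD j []).length)
          && PySem.Set.issubset (sets.getD i []) (sets.getD j []) then alive.set j false
      else alive) alive
  else alive

def subsume_alt (clauses : List (List Int)) : List (List Int) :=
  let kept := pvKeptB clauses
  let sets := kept.map (fun c => PySem.Set.ofList c)
  let alive := (PySem.List.sorted (List.range kept.length)
      (fun i => (kept.getD i []).length) false).foldl
    (pvStepB kept sets) (List.replicate kept.length true)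
  ((kept.zip alive).filter (fun p => p.2)).map (fun p => p.1)

-- ===== PRECONDITION & SPEC =====
-- Pre_ excludes inputs containing an empty clause: there A's 'min(ci, …)' is applied to an
-- empty frozenset and raises ValueError; A returns on everything else (B returns normally
-- there, keeping the empty clause).
def Pre_subsume (clauses : List (List Int)) : Prop := [] ∉ clauses
instance (clauses : List (List Int)) : Decidable (Pre_subsume clauses) := by
  unfold Pre_subsume; infer_instance

def pvWitness_subsume : List (List Int) := [[1, 2], [1], [2, 1]]

def Spec_subsume (clauses : List (List Int)) (out : List (List Int)) : Prop := out = subsume_alt clauses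
instance (clauses : List (List Int)) (out : List (List Int)) : Decidable (Spec_subsume clauses out) := by unfold Spec_subsume; infer_instance

-- ===== CLAIM (what is proved, stated in full; the proofs are below) =====
def Claim_equal_subsume : Prop := ∀ (clauses : List (List Int)), Dom_subsume clauses → Pre_subsume clauses → Spec_subsume clauses (subsume clauses)


-- ===== LEMMAS AND PROOFS =====

-- ---- dedup sides agree ----
theorem pvSeenLoopA_nodup (cl : List Int) (d : PySem.Dict Int Bool) (h : d.keys.Nodup) :
    (pvSeenLoopA cl d).1.keys.Nodup := by
  induction cl generalizing d with
  | nil => exact h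
  | cons l rest ih =>
    simp only [pvSeenLoopA]
    split
    · exact h
    · exact ih _ (PySem.Dict.nodup_keys_insert _ _ _ h)

theorem pvSeenLoopA_ne_nil (cl : List Int) (d : PySem.Dict Int Bool) (h : d.keys ≠ []) :
    (pvSeenLoopA cl d).1.keys ≠ [] := by
  induction cl generalizing d with
  | nil => exact h
  | cons l rest ih =>
    simp only [pvSeenLoopA]
    split
    · exact h
    · refine ih _ ?_
      by_cases hc : d.contains l = true
      · rw [PySem.Dict.keys_insert_of_contains _ _ hc]; exact h
      · rw [PySem.Dict.keys_insert_of_not_contains _ _ (by simpa using hc)]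
        simp

theorem pvCleanB_eq_seenLoop (cl : List Int) (d : PySem.Dict Int Bool)
    (s : PySem.Set Int) (out : List Int) (hk : d.keys = out) (hs : s = out) :
    pvCleanB cl s out =
      if (pvSeenLoopA cl d).2 then none else some (pvSeenLoopA cl d).1.keys := by
  induction cl generalizing d s out with
  | nil => simp [pvCleanB, pvSeenLoopA, hk]
  | cons l rest ih =>
    have hcont : ∀ y : Int, d.contains y = decide (y ∈ s) := by
      intro y
      have hmem : (y ∈ s) ↔ y ∈ d.keys := by rw [hs, ← hk]
      by_cases hy : y ∈ d.keys
      · simp [hmem, hy, (PySem.Dict.contains_iff_mem_keys d y).2 hy]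
      · have hne : d.contains y ≠ true := fun hc => hy ((PySem.Dict.contains_iff_mem_keys d y).1 hc)
        simp [hmem, hy, Bool.eq_false_iff.2 hne]
    simp only [pvCleanB, pvSeenLoopA, hcont]
    by_cases hm : (-l) ∈ s
    · simp [hm]
    · simp only [hm, decide_false, Bool.false_eq_true, if_false]
      by_cases hl : l ∈ s
      · rw [if_pos hl]
        exact ih (d.insert l true) s out
          (by rw [PySem.Dict.keys_insert_of_contains _ _ ((hcont l).symm ▸ by simp [hl])]; exact hk)
          hs
      · rw [if_neg hl]
        exact ih (d.insert l true) (PySem.Set.add s l) (out ++ [l])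
          (by rw [PySem.Dict.keys_insert_of_not_contains _ _ (by simp [hcont, hl]), hk])
          (by rw [PySem.Set.add_of_not_mem hl, hs])

theorem pvKeptB_eq_dedupA (clauses : List (List Int)) : pvKeptB clauses = pvDedupA clauses := by
  unfold pvKeptB pvDedupA
  refine PySem.List.foldl_congr_mem _ _ _ _ ?_
  intro acc cl _
  rw [pvCleanB_eq_seenLoop cl PySem.Dict.empty PySem.Set.empty []
    (by simp [PySem.Dict.keys_empty]) rfl]
  cases h : (pvSeenLoopA cl PySem.Dict.empty).2 <;> simp [h]

theorem pvDedupA_eq_filter_map (clauses : List (List Int)) :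
    pvDedupA clauses = (clauses.filter (fun cl => !(pvSeenLoopA cl PySem.Dict.empty).2)).map
      (fun cl => (pvSeenLoopA cl PySem.Dict.empty).1.keys) := by
  unfold pvDedupA
  rw [show (fun (out : List (List Int)) (cl : List Int) =>
      let r := pvSeenLoopA cl PySem.Dict.empty
      if r.2 then out else out ++ [r.1.keys]) =
    (fun out cl => if (!(pvSeenLoopA cl PySem.Dict.empty).2) = true then
      out ++ [(pvSeenLoopA cl PySem.Dict.empty).1.keys] else out) from by
      funext out cl
      cases h : (pvSeenLoopA cl PySem.Dict.empty).2 <;> simp [h]]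
  rw [PySem.List.foldl_append_if]
  simp

theorem pvDedupA_nodup (clauses : List (List Int)) (c : List Int) (hc : c ∈ pvDedupA clauses) :
    c.Nodup := by
  rw [pvDedupA_eq_filter_map] at hc
  obtain ⟨cl, _, rfl⟩ := List.mem_map.1 hc
  have := pvSeenLoopA_nodup cl PySem.Dict.empty (by simp [PySem.Dict.keys_empty])
  simpa using this

theorem pvDedupA_ne_nil (clauses : List (List Int)) (hpre : [] ∉ clauses)
    (c : List Int) (hc : c ∈ pvDedupA clauses) : c ≠ [] := by
  rw [pvDedupA_eq_filter_map] at hc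
  obtain ⟨cl, hcl, rfl⟩ := List.mem_map.1 hc
  have hclmem : cl ∈ clauses := (List.mem_filter.1 hcl).1
  have hclne : cl ≠ [] := fun h => hpre (h ▸ hclmem)
  obtain ⟨l, rest, rfl⟩ := List.exists_cons_of_ne_nil hclne
  have h2 := (List.mem_filter.1 hcl).2
  simp only [pvSeenLoopA, PySem.Dict.contains_empty, Bool.false_eq_true, if_false] at h2 ⊢
  refine pvSeenLoopA_ne_nil rest _ ?_
  rw [PySem.Dict.keys_insert_of_not_contains _ _ (PySem.Dict.contains_empty l)]
  simp

-- ---- occurrence index characterisation ----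
def pvIdxs (x : Int) : List (List Int) → Nat → List Nat
  | [], _ => []
  | c :: cls, k => if x ∈ c then k :: pvIdxs x cls (k + 1) else pvIdxs x cls (k + 1)

theorem pvOcc_inner (c : List Int) (hc : c.Nodup) (k : Nat)
    (d : PySem.Dict Int (List Nat)) (x : Int) :
    (c.foldl (fun d l => d.insert l (d.getD l [] ++ [k])) d).getD x [] =
      d.getD x [] ++ (if x ∈ c then [k] else []) := by
  induction c generalizing d with
  | nil => simp
  | cons m rest ih =>
    have hnd' : rest.Nodup := hc.of_cons
    have hm : m ∉ rest := (List.nodup_cons.1 hc).1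
    simp only [List.foldl_cons]
    rw [ih hnd' (d.insert m (d.getD m [] ++ [k]))]
    by_cases hxm : x = m
    · subst hxm
      simp [hm]
    · simp [PySem.Dict.getD_insert, hxm, List.mem_cons]

theorem pvOccGoA_getD (cls : List (List Int)) (k : Nat) (d : PySem.Dict Int (List Nat))
    (x : Int) (h : ∀ c ∈ cls, c.Nodup) :
    (pvOccGoA cls k d).getD x [] = d.getD x [] ++ pvIdxs x cls k := by
  induction cls generalizing k d with
  | nil => simp [pvOccGoA, pvIdxs]
  | cons c rest ih =>
    simp only [pvOccGoA, pvIdxs]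
    rw [ih (k + 1) _ (fun c hc => h c (List.mem_cons_of_mem _ hc)),
      pvOcc_inner c (h c List.mem_cons_self) k d x]
    by_cases hx : x ∈ c <;> simp [hx]

theorem mem_pvIdxs (x : Int) (cls : List (List Int)) (k j : Nat) :
    j ∈ pvIdxs x cls k ↔ k ≤ j ∧ j - k < cls.length ∧ x ∈ cls.getD (j - k) [] := by
  induction cls generalizing k with
  | nil => simp [pvIdxs]
  | cons c rest ih =>
    simp only [pvIdxs]
    constructor
    · intro hj
      by_cases hx : x ∈ c
      · rw [if_pos hx] at hj
        rcases List.mem_cons.1 hj with rfl | hj2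
        · exact ⟨le_refl _, by simpa using hx⟩
        · obtain ⟨h1, h2, h3⟩ := (ih (k + 1)).1 hj2
          refine ⟨by omega, ?_, ?_⟩
          · simpa [show j - k = (j - (k+1)) + 1 from by omega] using h2
          · rwa [show j - k = (j - (k+1)) + 1 from by omega, List.getD_cons_succ]
      · rw [if_neg hx] at hj
        obtain ⟨h1, h2, h3⟩ := (ih (k + 1)).1 hj
        refine ⟨by omega, ?_, ?_⟩
        · simpa [show j - k = (j - (k+1)) + 1 from by omega] using h2
        · rwa [show j - k = (j - (k+1)) + 1 from by omega, List.getD_cons_succ]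
    · rintro ⟨h1, h2, h3⟩
      by_cases hjk : j = k
      · subst hjk
        simp only [Nat.sub_self, List.getD_cons_zero] at h3
        rw [if_pos h3]
        exact List.mem_cons_self
      · have hrec : j ∈ pvIdxs x rest (k + 1) := by
          refine (ih (k + 1)).2 ⟨by omega, ?_, ?_⟩
          · simp only [List.length_cons] at h2; omega
          · rwa [show j - k = (j - (k+1)) + 1 from by omega, List.getD_cons_succ] at h3
        by_cases hx : x ∈ c
        · rw [if_pos hx]; exact List.mem_cons_of_mem _ hrec
        · rwa [if_neg hx]

theorem pairwise_pvIdxs (x : Int) (cls : List (List Int)) (k : Nat) :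
    (pvIdxs x cls k).Pairwise (· < ·) := by
  induction cls generalizing k with
  | nil => simp [pvIdxs]
  | cons c rest ih =>
    simp only [pvIdxs]
    by_cases hx : x ∈ c
    · rw [if_pos hx]
      refine List.pairwise_cons.2 ⟨fun j hj => ?_, ih (k + 1)⟩
      have := ((mem_pvIdxs x rest (k + 1) j).1 hj).1
      omega
    · rw [if_neg hx]; exact ih (k + 1)

theorem pvOccIndexA_getD (cs : List (List Int)) (h : ∀ c ∈ cs, c.Nodup) (x : Int) :
    (pvOccIndexA cs).getD x [] = pvIdxs x cs 0 := by
  unfold pvOccIndexA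
  rw [pvOccGoA_getD cs 0 PySem.Dict.empty x h, PySem.Dict.getD_empty]
  simp

-- ---- the two inner loops agree ----
theorem pvCoreA (a : List Bool) (i j li lj : Nat) (b : Bool) :
    (if j == i || !(a.getD j false) then a
     else if lj < li then a
     else if b then a.set j false else a)
    = if b then (if j == i || !(a.getD j false) then a
        else if lj < li then a else a.set j false) else a := by
  cases b <;> simp

theorem pvCoreAB (a : List Bool) (i j li lj : Nat) :
    (if j == i || !(a.getD j false) then a else if lj < li then a else a.set j false)
    = if (j != i) && a.getD j false && decide (li ≤ lj) then a.set j false else a := by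
  by_cases hji : j = i
  · simp [hji]
  · cases haj : a.getD j false
    · simp
    · rcases Nat.lt_or_ge lj li with h | h
      · simp [hji, h, Nat.not_le.2 h]
      · simp [hji, Nat.not_lt.2 h, h]

theorem pvStepA_eq_pvStepB (cs : List (List Int)) (hnd : ∀ c ∈ cs, c.Nodup)
    (hne : ∀ c ∈ cs, c ≠ []) (alive : List Bool) (i : Nat) (hi : i < cs.length) :
    pvStepA cs (cs.map (fun c => PySem.Set.ofList c)) (pvOccIndexA cs) alive i =
      pvStepB cs (cs.map (fun c => PySem.Set.ofList c)) alive i := by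
  have hgetmap : ∀ j, j < cs.length →
      (cs.map (fun c => PySem.Set.ofList c)).getD j [] = PySem.Set.ofList (cs.getD j []) := by
    intro j hj
    rw [List.getD_eq_getElem _ _ (by simpa using hj), List.getD_eq_getElem _ _ hj,
      List.getElem_map]
  have hcimem : cs.getD i [] ∈ cs := by
    rw [List.getD_eq_getElem _ _ hi]; exact List.getElem_mem hi
  have hcine : cs.getD i [] ≠ [] := hne _ hcimem
  unfold pvStepA pvStepB
  cases hai : alive.getD i false
  · simp
  · simp only [Bool.not_true, Bool.false_eq_true, if_false, if_true]
    have hcisetne : (cs.map (fun c => PySem.Set.ofList c)).getD i [] ≠ [] := by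
      rw [hgetmap i hi]
      obtain ⟨l, t, hct⟩ := List.exists_cons_of_ne_nil hcine
      exact List.ne_nil_of_mem ((PySem.Set.mem_ofList _ l).2 (hct ▸ List.mem_cons_self))
    obtain ⟨pivot, hmin⟩ : ∃ p, PySem.List.min? ((cs.map (fun c => PySem.Set.ofList c)).getD i [])
        (fun l => (((pvOccIndexA cs).getD l [])).length) = some p := by
      cases hm : PySem.List.min? ((cs.map (fun c => PySem.Set.ofList c)).getD i [])
          (fun l => (((pvOccIndexA cs).getD l [])).length) with
      | none => exact absurd ((PySem.List.min?_eq_none_iff _ _).1 hm) hcisetne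
      | some p => exact ⟨p, rfl⟩
    simp only [hmin]
    have hpivci : pivot ∈ cs.getD i [] := by
      have := PySem.List.min?_mem hmin
      rwa [hgetmap i hi, PySem.Set.mem_ofList] at this
    rw [pvOccIndexA_getD cs hnd pivot]
    have hq_lt : ∀ j, PySem.Set.issubset ((cs.map (fun c => PySem.Set.ofList c)).getD i [])
        ((cs.map (fun c => PySem.Set.ofList c)).getD j []) = true →
        j < cs.length ∧ pivot ∈ cs.getD j [] := by
      intro j hqj
      have hsub := (PySem.Set.issubset_iff _ _).1 hqj
      have hpiv2 : pivot ∈ (cs.map (fun c => PySem.Set.ofList c)).getD j [] :=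
        hsub pivot (by rw [hgetmap i hi, PySem.Set.mem_ofList]; exact hpivci)
      by_cases hj : j < cs.length
      · refine ⟨hj, ?_⟩
        rwa [hgetmap j hj, PySem.Set.mem_ofList] at hpiv2
      · rw [List.getD_eq_default _ _ (by simpa using Nat.le_of_not_lt hj)] at hpiv2
        simp at hpiv2
    have hkey : (pvIdxs pivot cs 0).filter (fun j =>
          PySem.Set.issubset ((cs.map (fun c => PySem.Set.ofList c)).getD i [])
            ((cs.map (fun c => PySem.Set.ofList c)).getD j [])) =
        (List.range cs.length).filter (fun j =>
          PySem.Set.issubset ((cs.map (fun c => PySem.Set.ofList c)).getD i [])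
            ((cs.map (fun c => PySem.Set.ofList c)).getD j [])) := by
      refine List.Perm.eq_of_pairwise (le := (· < ·)) (fun a b _ _ h1 h2 => by omega)
        ((pairwise_pvIdxs pivot cs 0).filter _) ((List.pairwise_lt_range).filter _) ?_
      refine (List.perm_ext_iff_of_nodup
        (((pairwise_pvIdxs pivot cs 0).filter _).imp Nat.ne_of_lt)
        (((List.pairwise_lt_range).filter _).imp Nat.ne_of_lt)).2 ?_
      intro j
      simp only [List.mem_filter, List.mem_range, mem_pvIdxs, Nat.sub_zero, Nat.zero_le,
        true_and]
      constructor
      · rintro ⟨⟨h1, _⟩, h2⟩; exact ⟨h1, h2⟩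
      · rintro ⟨h1, h2⟩; exact ⟨⟨h1, (hq_lt j h2).2⟩, h2⟩
    trans (List.foldl (fun (a : List Bool) (j : Nat) =>
      if PySem.Set.issubset ((cs.map (fun c => PySem.Set.ofList c)).getD i [])
          ((cs.map (fun c => PySem.Set.ofList c)).getD j []) = true then
        (if j == i || !(a.getD j false) then a
         else if (cs.getD j []).length < (cs.getD i []).length then a
         else a.set j false)
      else a) alive (pvIdxs pivot cs 0))
    · exact PySem.List.foldl_congr_mem _ _ _ _ (fun a j _ => pvCoreA a i j _ _ _)
    rw [PySem.List.foldl_if_eq_foldl_filter, hkey, ← PySem.List.foldl_if_eq_foldl_filter]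
    refine PySem.List.foldl_congr_mem _ _ _ _ (fun a j _ => ?_)
    by_cases hqj : PySem.Set.issubset ((cs.map (fun c => PySem.Set.ofList c)).getD i [])
        ((cs.map (fun c => PySem.Set.ofList c)).getD j []) = true
    · rw [if_pos hqj, pvCoreAB a i j]
      rw [hqj, Bool.and_true]
    · rw [if_neg hqj]
      have hf := Bool.eq_false_iff.2 (fun h => hqj h)
      rw [hf, Bool.and_false, if_neg (by simp)]

-- ---- lengths and final extraction ----
theorem foldl_length_inv {α : Type} (f : List Bool → α → List Bool) (l : List α)
    (a : List Bool) (h : ∀ acc x, (f acc x).length = acc.length) :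
    (l.foldl f a).length = a.length := by
  induction l generalizing a with
  | nil => rfl
  | cons x xs ih => simpa [List.foldl, h] using ih (f a x)

theorem pvStepB_length (kept : List (List Int)) (sets : List (PySem.Set Int))
    (alive : List Bool) (i : Nat) :
    (pvStepB kept sets alive i).length = alive.length := by
  unfold pvStepB
  split
  · refine foldl_length_inv _ _ _ (fun acc j => ?_)
    split
    · exact List.length_set
    · rfl
  · rfl

theorem zip_extract_eq (cs : List (List Int)) (al : List Bool) (h : al.length = cs.length) :
    ((cs.zip al).filter (fun p => p.2)).map (fun p => p.1) =
      ((List.range cs.length).filter (fun i => al.getD i false)).map (fun i => cs.getD i []) := by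
  induction cs generalizing al with
  | nil =>
    rw [List.length_eq_zero_iff.1 h]
    simp
  | cons c cs' ih =>
    cases al with
    | nil => simp at h
    | cons b al' =>
      simp only [List.length_cons] at h
      have h' : al'.length = cs'.length := by omega
      rw [List.zip_cons_cons, List.filter_cons, List.length_cons, List.range_succ_eq_map,
        List.filter_cons]
      have hmapf : ((List.range cs'.length).map Nat.succ).filter
            (fun i => (b :: al').getD i false) =
          ((List.range cs'.length).filter (fun i => al'.getD i false)).map Nat.succ := by
        rw [List.filter_map]
        simp [Function.comp_def]
      cases b
      · simp only [List.getD_cons_zero, Bool.false_eq_true, if_false, hmapf, List.map_map]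
        rw [ih al' h']
        exact (List.map_congr_left (fun i _ => by simp)).symm
      · simp only [List.getD_cons_zero, if_true, hmapf, List.map_map, List.map_cons]
        rw [ih al' h']
        exact congrArg _ ((List.map_congr_left (fun i _ => by simp)).symm)

-- ===== VERDICT (by name: the statement is the Claim_ definition above) =====
theorem subsume_spec : Claim_equal_subsume := by
  intro clauses _ hpre
  unfold Spec_subsume subsume subsume_alt
  rw [pvKeptB_eq_dedupA]
  have hnd := pvDedupA_nodup clauses
  have hne := pvDedupA_ne_nil clauses hpre
  have hfold : (PySem.List.sorted (List.range (pvDedupA clauses).length)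
        (fun i => ((pvDedupA clauses).getD i []).length) false).foldl
        (pvStepA (pvDedupA clauses) ((pvDedupA clauses).map (fun c => PySem.Set.ofList c))
          (pvOccIndexA (pvDedupA clauses)))
        (List.replicate (pvDedupA clauses).length true) =
      (PySem.List.sorted (List.range (pvDedupA clauses).length)
        (fun i => ((pvDedupA clauses).getD i []).length) false).foldl
        (pvStepB (pvDedupA clauses) ((pvDedupA clauses).map (fun c => PySem.Set.ofList c)))
        (List.replicate (pvDedupA clauses).length true) := by
    refine PySem.List.foldl_congr_mem _ _ _ _ (fun a i hi => ?_)
    have : i < (pvDedupA clauses).length := by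
      have := (PySem.List.mem_sorted _ _ _ i).1 hi
      simpa using this
    exact pvStepA_eq_pvStepB _ hnd hne a i this
  simp only [hfold]
  rw [zip_extract_eq _ _ ?_]
  refine foldl_length_inv _ _ _ (fun acc i => pvStepB_length _ _ acc i) |>.trans ?_
  exact List.length_replicate
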